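-- pv_equiv track=rewrite | github.com/mcrco/cs165-project | datasets/april/fast_convert_april.py | extract_tactic_lines
-- ===== SOURCE A (Python) =====
-- def extract_tactic_lines(tactic_block: str) -> list[str]:
--     """Split a tactic block into individual tactic strings.
--
--     Handles indented sub-blocks by joining continuation lines.
--     """
--     raw_lines = tactic_block.split("\n")
--     tactics: list[str] = []
--     current: list[str] = []
--     base_indent: int | None = None
--
--     DECL_KEYWORDS = {"theorem", "lemma", "def", "noncomputable", "instance",
--                       "class", "structure", "inductive", "namespace", "section",
--                       "end", "import", "open", "variable", "set_option", "#"}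
--
--     for line in raw_lines:
--         stripped = line.rstrip()
--         if not stripped:
--             continue
--         trimmed = stripped.lstrip()
--
--         if trimmed.startswith("--"):
--             continue
--
--         indent = len(line) - len(line.lstrip())
--         if base_indent is None:
--             base_indent = indent
--
--         first_word = trimmed.split()[0] if trimmed.split() else ""
--         if indent <= base_indent and first_word in DECL_KEYWORDS:
--             break
--
--         if indent <= base_indent and current:
--             tactics.append("\n".join(current))
--             current = [stripped]
--         else:
--             current.append(stripped)
--
--     if current:
--         tactics.append("\n".join(current))
--
--     return [t.strip() for t in tactics if t.strip()]
-- ===== SOURCE B (Python) =====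
-- def extract_tactic_lines(tactic_block: str) -> list[str]:
--     """Split a tactic block into individual tactic strings.
--
--     Two-pointer rewrite: filter once to (indent, text) entries, then locate each
--     group's extent with a pair of indices and emit the finished tactic string
--     directly (head line lstripped) -- no current-buffer, no flush, and no trailing
--     strip/filter pass: every emitted string is already stripped and non-empty
--     because entries are non-blank and rstripped.
--     """
--     DECL_KEYWORDS = {"theorem", "lemma", "def", "noncomputable", "instance",
--                      "class", "structure", "inductive", "namespace", "section",
--                      "end", "import", "open", "variable", "set_option", "#"}
--
--     def keep(line):  # non-blank after rstrip, and not a comment line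
--         t = line.rstrip()
--         return bool(t) and not t.lstrip().startswith("--")
--
--     entries = [(len(l) - len(l.lstrip()), l.rstrip())
--                for l in tactic_block.split("\n") if keep(l)]
--     if not entries:
--         return []
--     base = entries[0][0]
--
--     out = []
--     i = 0
--     while i < len(entries):
--         ind, text = entries[i]
--         if ind <= base and text.split()[0] in DECL_KEYWORDS:
--             break
--         j = i + 1
--         while j < len(entries) and entries[j][0] > base:
--             j += 1
--         out.append("\n".join([text.lstrip()] + [t for _, t in entries[i + 1:j]]))
--         i = j
--     return out
-- ===== Notes on version B (the rewrite author's own statement) =====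
-- stated objective: alternative
-- what changed: A's single stateful loop with a current-buffer, flush-at-boundary, final flush and a trailing strip/filter pass is replaced by a two-pointer scan over a pre-filtered (indent, text) list that locates each group's extent by index and emits every finished tactic string directly with the head line lstripped, with no buffers and no post-processing pass.
import Mathlib
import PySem

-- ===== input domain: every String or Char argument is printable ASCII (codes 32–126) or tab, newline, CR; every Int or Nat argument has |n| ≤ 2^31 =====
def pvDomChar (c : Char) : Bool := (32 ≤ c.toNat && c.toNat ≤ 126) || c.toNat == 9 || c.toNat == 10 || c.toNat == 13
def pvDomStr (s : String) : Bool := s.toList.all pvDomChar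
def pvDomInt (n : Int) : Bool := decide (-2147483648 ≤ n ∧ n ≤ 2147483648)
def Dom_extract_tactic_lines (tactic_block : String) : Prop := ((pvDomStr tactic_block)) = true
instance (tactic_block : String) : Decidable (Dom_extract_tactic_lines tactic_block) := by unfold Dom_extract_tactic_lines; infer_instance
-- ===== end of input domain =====

-- B replaces A's stateful buffer/flush loop (plus trailing strip/filter pass) by a two-pointer
-- scan over a pre-filtered (indent, text) list that emits each finished tactic directly;
-- objective: alternative decomposition, same asymptotic cost.

-- ===== PORT A =====
def pvDecl : List (List Char) :=
  ["theorem".toList, "lemma".toList, "def".toList, "noncomputable".toList, "instance".toList,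
   "class".toList, "structure".toList, "inductive".toList, "namespace".toList, "section".toList,
   "end".toList, "import".toList, "open".toList, "variable".toList, "set_option".toList, "#".toList]

-- trimmed.split()[0] if trimmed.split() else ""
def pvFirstWord (t : List Char) : List Char :=
  match PySem.Chars.split₀ t with
  | [] => []
  | w :: _ => w

def pvLoopA : List (List Char) → List (List Char) × List (List Char) → Option Int →
    List (List Char) × List (List Char)
  | [], st, _ => st
  | line :: rest, (tactics, current), base =>
    let stripped := PySem.Chars.rstrip line
    if stripped = [] then pvLoopA rest (tactics, current) base
    else
      let trimmed := PySem.Chars.lstrip stripped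
      if PySem.Chars.startswith trimmed ['-', '-'] then pvLoopA rest (tactics, current) base
      else
        let indent : Int := PySem.Chars.len line - PySem.Chars.len (PySem.Chars.lstrip line)
        let b := base.getD indent
        if indent ≤ b ∧ pvFirstWord trimmed ∈ pvDecl then (tactics, current)
        else if indent ≤ b ∧ current ≠ [] then
          pvLoopA rest (tactics ++ [PySem.Chars.join ['\n'] current], [stripped]) (some b)
        else pvLoopA rest (tactics, current ++ [stripped]) (some b)

def extract_tactic_lines (tactic_block : String) : List String :=
  let raw_lines := PySem.Chars.splitOn tactic_block.toList ['\n']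
  let res := pvLoopA raw_lines ([], []) none
  let tactics := if res.2 ≠ [] then res.1 ++ [PySem.Chars.join ['\n'] res.2] else res.1
  (tactics.filter (fun t => PySem.Chars.strip t ≠ [])).map
    (fun t => String.ofList (PySem.Chars.strip t))

-- ===== PORT B =====
-- B's own copy of the keyword set (Source B defines its own DECL_KEYWORDS)
def pvDeclAlt : List (List Char) :=
  ["theorem".toList, "lemma".toList, "def".toList, "noncomputable".toList, "instance".toList,
   "class".toList, "structure".toList, "inductive".toList, "namespace".toList, "section".toList,
   "end".toList, "import".toList, "open".toList, "variable".toList, "set_option".toList, "#".toList]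

-- Source B's keep(line): non-blank after rstrip, and not a comment line
def pvKeep (line : List Char) : Bool :=
  decide (PySem.Chars.rstrip line ≠ []) &&
    !PySem.Chars.startswith (PySem.Chars.lstrip (PySem.Chars.rstrip line)) ['-', '-']

-- the entries comprehension (filterMap = comprehension with an if)
def pvEntriesB (tactic_block : String) : List (Int × List Char) :=
  (PySem.Chars.splitOn tactic_block.toList ['\n']).filterMap (fun l =>
    if pvKeep l then
      some (PySem.Chars.len l - PySem.Chars.len (PySem.Chars.lstrip l), PySem.Chars.rstrip l)
    else none)

-- inner while: j += 1 while entries[j] is deeper than base (entries[j] is in range, getD is exact)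
def pvScan (base : Int) (entries : List (Int × List Char)) (j : Nat) : Nat :=
  if h : j < entries.length ∧ base < (entries.getD j (0, [])).1 then pvScan base entries (j + 1)
  else j
termination_by entries.length - j
decreasing_by omega

-- the scan index never moves left (cited by pvBuild's decreasing_by)
theorem pvScan_ge (base : Int) (entries : List (Int × List Char)) (j : Nat) :
    j ≤ pvScan base entries j := by
  unfold pvScan
  split
  · exact le_trans (by omega) (pvScan_ge base entries (j + 1))
  · exact le_refl j
termination_by entries.length - j
decreasing_by omega

-- outer while over the index i; entries[i + 1:j] with 0 ≤ i+1 ≤ j ≤ len is exactly drop/take;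
-- text.split()[0] is exact as headD [] since text is non-blank (its split() is non-empty)
def pvBuild (base : Int) (entries : List (Int × List Char)) (i : Nat) (out : List (List Char)) :
    List (List Char) :=
  if h : i < entries.length then
    let e := entries.getD i (0, [])
    if e.1 ≤ base ∧ (PySem.Chars.split₀ e.2).headD [] ∈ pvDeclAlt then out
    else
      let j := pvScan base entries (i + 1)
      pvBuild base entries j (out ++ [PySem.Chars.join ['\n']
        (PySem.Chars.lstrip e.2 :: ((entries.drop (i + 1)).take (j - (i + 1))).map (·.2))])
  else out
termination_by entries.length - i
decreasing_by have := pvScan_ge base entries (i + 1); omega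

def extract_tactic_lines_alt (tactic_block : String) : List String :=
  let entries := pvEntriesB tactic_block
  match entries with
  | [] => []
  | e :: _ => (pvBuild e.1 entries 0 []).map String.ofList

-- ===== PRECONDITION & SPEC =====
def Spec_extract_tactic_lines (tactic_block : String) (out : List String) : Prop := out = extract_tactic_lines_alt tactic_block
instance (tactic_block : String) (out : List String) : Decidable (Spec_extract_tactic_lines tactic_block out) := by unfold Spec_extract_tactic_lines; infer_instance

-- ===== CLAIM (what is proved, stated in full; the proofs are below) =====
def Claim_equal_extract_tactic_lines : Prop := ∀ (tactic_block : String), Dom_extract_tactic_lines tactic_block → Spec_extract_tactic_lines tactic_block (extract_tactic_lines tactic_block)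

-- ===== LEMMAS AND PROOFS =====

-- entries of a line list (proof-side view; pvEntriesB tb = pvEnts (splitOn tb.toList '\n') by rfl)
def pvEnts (lines : List (List Char)) : List (Int × List Char) :=
  lines.filterMap (fun l =>
    if pvKeep l then
      some (PySem.Chars.len l - PySem.Chars.len (PySem.Chars.lstrip l), PySem.Chars.rstrip l)
    else none)

-- A's loop after base_indent is fixed, at the entry level
def pvProcE (b : Int) : List (Int × List Char) → List (List Char) × List (List Char) →
    List (List Char) × List (List Char)
  | [], st => st
  | e :: rest, (tactics, current) =>
    if e.1 ≤ b ∧ pvFirstWord (PySem.Chars.lstrip e.2) ∈ pvDecl then (tactics, current)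
    else if e.1 ≤ b ∧ current ≠ [] then
      pvProcE b rest (tactics ++ [PySem.Chars.join ['\n'] current], [e.2])
    else pvProcE b rest (tactics, current ++ [e.2])

-- A's epilogue: flush the current buffer, then strip/filter
def pvPost0 (t : List (List Char)) : List (List Char) :=
  (t.filter (fun s => PySem.Chars.strip s ≠ [])).map (fun s => PySem.Chars.strip s)

def pvPost (st : List (List Char) × List (List Char)) : List (List Char) :=
  pvPost0 (if st.2 ≠ [] then st.1 ++ [PySem.Chars.join ['\n'] st.2] else st.1)

-- the group list B computes, as structural recursion (bridge between pvBuild and pvProcE)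
def pvGroups (b : Int) : List (Int × List Char) → List (List Char)
  | [] => []
  | e :: rest =>
    if e.1 ≤ b ∧ (PySem.Chars.split₀ e.2).headD [] ∈ pvDeclAlt then []
    else
      PySem.Chars.join ['\n'] (PySem.Chars.lstrip e.2 ::
          (rest.takeWhile (fun x => b < x.1)).map (·.2)) ::
        pvGroups b (rest.dropWhile (fun x => b < x.1))
termination_by es => es.length
decreasing_by exact Nat.lt_succ_of_le (List.length_dropWhile_le _ _)

theorem pv_go_lstrip (s : List Char) (acc : List (List Char)) :
    PySem.Chars.split₀.go (s.dropWhile PySem.Chars.isspace) [] acc =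
      PySem.Chars.split₀.go s [] acc := by
  induction s with
  | nil => rfl
  | cons c rest ih =>
    by_cases h : PySem.Chars.isspace c = true
    · simp [List.dropWhile_cons, h, PySem.Chars.split₀.go, ih]
    · simp [List.dropWhile_cons, h, PySem.Chars.split₀.go]

theorem pv_split₀_lstrip (s : List Char) :
    PySem.Chars.split₀ (PySem.Chars.lstrip s) = PySem.Chars.split₀ s := by
  simp [PySem.Chars.split₀, PySem.Chars.lstrip, pv_go_lstrip]

theorem pv_firstWord_lstrip (s : List Char) :
    pvFirstWord (PySem.Chars.lstrip s) = (PySem.Chars.split₀ s).headD [] := by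
  unfold pvFirstWord
  rw [pv_split₀_lstrip]
  cases PySem.Chars.split₀ s <;> rfl

theorem pvDeclAlt_eq : pvDeclAlt = pvDecl := rfl

-- ---------- string facts ----------

-- dropWhile is the identity exactly when the head (if any) fails the predicate
theorem pv_dropWhile_eq_self {p : Char → Bool} {c : Char} {r : List Char}
    (h : List.dropWhile p (c :: r) = c :: r) : p c = false := by
  by_contra hc
  have hc' : p c = true := by revert hc; cases p c <;> simp
  rw [List.dropWhile_cons, if_pos hc'] at h
  have := List.length_dropWhile_le p r
  have := congrArg List.length h
  simp at this
  omega

-- appending in front of an rstripped non-empty tail leaves rstrip inert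
theorem pv_rstrip_append (m l : List Char) (h : PySem.Chars.rstrip l ≠ []) :
    PySem.Chars.rstrip (m ++ PySem.Chars.rstrip l) = m ++ PySem.Chars.rstrip l := by
  unfold PySem.Chars.rstrip at *
  rw [List.reverse_append, List.reverse_reverse]
  rcases hd : List.dropWhile PySem.Chars.isspace l.reverse with _ | ⟨c, r⟩
  · exact absurd (by simp [hd]) h
  · have hc : PySem.Chars.isspace c = false := by
      have : List.dropWhile PySem.Chars.isspace (c :: r) = c :: r := by
        rw [← hd, List.dropWhile_idempotent]
      exact pv_dropWhile_eq_self this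
    simp [List.dropWhile_cons, hc]

theorem pv_rstrip_idem (l : List Char) :
    PySem.Chars.rstrip (PySem.Chars.rstrip l) = PySem.Chars.rstrip l := by
  by_cases h : PySem.Chars.rstrip l = []
  · rw [h]; rfl
  · have := pv_rstrip_append [] l h
    simpa using this

-- an rstripped non-empty string has a non-space last character, hence:
theorem pv_lstrip_rstripped (x : List Char) (hx : x ≠ []) (hr : PySem.Chars.rstrip x = x) :
    PySem.Chars.lstrip x ≠ [] ∧
      PySem.Chars.rstrip (PySem.Chars.lstrip x) = PySem.Chars.lstrip x := by
  -- x.reverse = c :: r with isspace c = false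
  rcases hrev : x.reverse with _ | ⟨c, r⟩
  · exact absurd (by simpa using congrArg List.reverse hrev) hx
  · have hself : List.dropWhile PySem.Chars.isspace (c :: r) = c :: r := by
      have := hr; unfold PySem.Chars.rstrip at this
      rw [hrev] at this
      have := congrArg List.reverse this
      rw [List.reverse_reverse, ← hrev, hrev] at this
      exact this
    have hc : PySem.Chars.isspace c = false := pv_dropWhile_eq_self hself
    -- c is the last element of x, and it is also the last element of lstrip x
    have hmemc : c ∈ x := by
      have : c ∈ x.reverse := by rw [hrev]; exact List.mem_cons_self
      simpa using this
    have hlne : PySem.Chars.lstrip x ≠ [] := by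
      intro hmt
      have hall : ∀ y ∈ x, PySem.Chars.isspace y = true :=
        List.dropWhile_eq_nil_iff.1 hmt
      rw [hall c hmemc] at hc; exact absurd hc (by simp)
    constructor
    · exact hlne
    · -- x = t ++ lstrip x; reverse: (lstrip x).reverse ++ t.reverse, head of (lstrip x).reverse = c
      obtain ⟨t, ht⟩ := List.dropWhile_suffix (l := x) (p := PySem.Chars.isspace)
      unfold PySem.Chars.rstrip
      rcases hrl : (PySem.Chars.lstrip x).reverse with _ | ⟨c', r'⟩
      · exact absurd (by simpa using congrArg List.reverse hrl) hlne
      · have hx' : x.reverse = c' :: (r' ++ t.reverse) := by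
          rw [← ht, List.reverse_append]
          unfold PySem.Chars.lstrip at hrl
          rw [hrl]; simp
        have hcc : c' = c := by rw [hrev] at hx'; exact (List.cons.injEq _ _ _ _ ▸ hx').1.symm
        rw [List.dropWhile_cons, hcc, hc, if_neg (by simp)]
        rw [← hcc, ← hrl, List.reverse_reverse]

-- lstrip passes over into an append once the head part keeps a non-space character
theorem pv_lstrip_append (x r : List Char) (h : PySem.Chars.lstrip x ≠ []) :
    PySem.Chars.lstrip (x ++ r) = PySem.Chars.lstrip x ++ r := by
  unfold PySem.Chars.lstrip at *
  rw [List.dropWhile_append]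
  simp only [List.isEmpty_iff]
  rw [if_neg h]

theorem pv_join_ne_nil (y : List Char) (xs : List (List Char)) (hy : y ≠ []) :
    PySem.Chars.join ['\n'] (y :: xs) ≠ [] := by
  cases xs with
  | nil => rw [PySem.Chars.join_singleton]; exact hy
  | cons x t =>
    rw [PySem.Chars.join_cons_cons]
    simp [hy]

theorem pv_lstrip_join (y : List Char) (xs : List (List Char)) (h : PySem.Chars.lstrip y ≠ []) :
    PySem.Chars.lstrip (PySem.Chars.join ['\n'] (y :: xs)) =
      PySem.Chars.join ['\n'] (PySem.Chars.lstrip y :: xs) := by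
  cases xs with
  | nil => rw [PySem.Chars.join_singleton, PySem.Chars.join_singleton]
  | cons x t =>
    rw [PySem.Chars.join_cons_cons, PySem.Chars.join_cons_cons, List.append_assoc,
      List.append_assoc, pv_lstrip_append y _ h]

theorem pv_rstrip_join (xs : List (List Char)) (y : List Char)
    (h : ∀ z ∈ y :: xs, z ≠ [] ∧ PySem.Chars.rstrip z = z) :
    PySem.Chars.rstrip (PySem.Chars.join ['\n'] (y :: xs)) = PySem.Chars.join ['\n'] (y :: xs) := by
  induction xs generalizing y with
  | nil => rw [PySem.Chars.join_singleton]; exact (h y List.mem_cons_self).2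
  | cons x t ih =>
    have hJ : PySem.Chars.rstrip (PySem.Chars.join ['\n'] (x :: t)) =
        PySem.Chars.join ['\n'] (x :: t) := by
      exact ih x (fun z hz => h z (List.mem_cons_of_mem _ hz))
    have hJne : PySem.Chars.join ['\n'] (x :: t) ≠ [] :=
      pv_join_ne_nil x t (h x (List.mem_cons_of_mem _ List.mem_cons_self)).1
    have hstep := pv_rstrip_append (y ++ ['\n']) (PySem.Chars.join ['\n'] (x :: t))
      (by rw [hJ]; exact hJne)
    rw [hJ] at hstep
    rw [PySem.Chars.join_cons_cons]
    simpa [List.append_assoc] using hstep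

-- the central string fact: strip of a joined group = lstrip its head
theorem pv_strip_join (y : List Char) (xs : List (List Char))
    (h : ∀ z ∈ y :: xs, z ≠ [] ∧ PySem.Chars.rstrip z = z) :
    PySem.Chars.strip (PySem.Chars.join ['\n'] (y :: xs)) =
      PySem.Chars.join ['\n'] (PySem.Chars.lstrip y :: xs) ∧
    PySem.Chars.join ['\n'] (PySem.Chars.lstrip y :: xs) ≠ [] := by
  obtain ⟨hy, hry⟩ := h y List.mem_cons_self
  obtain ⟨hl, hrl⟩ := pv_lstrip_rstripped y hy hry
  refine ⟨?_, pv_join_ne_nil _ _ hl⟩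
  show PySem.Chars.rstrip (PySem.Chars.lstrip _) = _
  rw [pv_lstrip_join y xs hl]
  exact pv_rstrip_join xs (PySem.Chars.lstrip y)
    (by intro z hz
        rcases List.mem_cons.1 hz with hz1 | hz1
        · subst hz1; exact ⟨hl, hrl⟩
        · exact h z (List.mem_cons_of_mem _ hz1))

-- ---------- A side: loop → entries ----------

theorem pvEnts_cons (line : List Char) (rest : List (List Char)) :
    pvEnts (line :: rest) =
      (if pvKeep line
        then [(PySem.Chars.len line - PySem.Chars.len (PySem.Chars.lstrip line),
               PySem.Chars.rstrip line)]
        else []) ++ pvEnts rest := by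
  simp only [pvEnts, List.filterMap_cons]
  split_ifs <;> simp_all

theorem pv_loopA_skip (line : List Char) (rest : List (List Char))
    (st : List (List Char) × List (List Char)) (base : Option Int)
    (h : pvKeep line = false) :
    pvLoopA (line :: rest) st base = pvLoopA rest st base := by
  obtain ⟨tactics, current⟩ := st
  unfold pvKeep at h
  by_cases h1 : PySem.Chars.rstrip line = []
  · simp [pvLoopA, h1]
  · have h2 : PySem.Chars.startswith (PySem.Chars.lstrip (PySem.Chars.rstrip line))
        ['-', '-'] = true := by
      revert h; simp [h1]
    simp [pvLoopA, h1, h2]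

theorem pv_keep_parts (line : List Char) (h : pvKeep line = true) :
    PySem.Chars.rstrip line ≠ [] ∧
      PySem.Chars.startswith (PySem.Chars.lstrip (PySem.Chars.rstrip line)) ['-', '-'] = false := by
  unfold pvKeep at h
  constructor
  · intro h1; rw [h1] at h; simp at h
  · revert h; cases PySem.Chars.startswith (PySem.Chars.lstrip (PySem.Chars.rstrip line))
      ['-', '-'] <;> simp

theorem pv_loopA_step (line : List Char) (rest : List (List Char))
    (tactics current : List (List Char)) (base : Option Int)
    (h : pvKeep line = true) :
    pvLoopA (line :: rest) (tactics, current) base =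
      (let indent : Int := PySem.Chars.len line - PySem.Chars.len (PySem.Chars.lstrip line)
       let b := base.getD indent
       if indent ≤ b ∧ pvFirstWord (PySem.Chars.lstrip (PySem.Chars.rstrip line)) ∈ pvDecl then
         (tactics, current)
       else if indent ≤ b ∧ current ≠ [] then
         pvLoopA rest (tactics ++ [PySem.Chars.join ['\n'] current], [PySem.Chars.rstrip line]) (some b)
       else pvLoopA rest (tactics, current ++ [PySem.Chars.rstrip line]) (some b)) := by
  obtain ⟨h1, h2⟩ := pv_keep_parts line h
  simp [pvLoopA, h1, h2]

theorem pv_loopA_some (lines : List (List Char)) (st : List (List Char) × List (List Char))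
    (b : Int) : pvLoopA lines st (some b) = pvProcE b (pvEnts lines) st := by
  induction lines generalizing st with
  | nil => obtain ⟨tactics, current⟩ := st; rfl
  | cons line rest ih =>
    obtain ⟨tactics, current⟩ := st
    rw [pvEnts_cons]
    by_cases h : pvKeep line = true
    · rw [pv_loopA_step _ _ _ _ _ h, if_pos h, List.singleton_append]
      simp only [Option.getD_some, pvProcE]
      split_ifs <;> first | rfl | exact ih _
    · have h' : pvKeep line = false := by revert h; cases pvKeep line <;> simp
      rw [pv_loopA_skip _ _ _ _ h', if_neg h, List.nil_append]
      exact ih _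

theorem pv_loopA_none (lines : List (List Char)) :
    pvLoopA lines ([], []) none =
      (match pvEnts lines with
       | [] => ([], [])
       | e :: rest => pvProcE e.1 (e :: rest) ([], [])) := by
  induction lines with
  | nil => rfl
  | cons line rest ih =>
    by_cases h : pvKeep line = true
    · rw [pv_loopA_step _ _ _ _ _ h, pvEnts_cons, if_pos h, List.singleton_append]
      simp only [Option.getD_none, pvProcE, pv_loopA_some]
    · have h' : pvKeep line = false := by revert h; cases pvKeep line <;> simp
      rw [pv_loopA_skip _ _ _ _ h', pvEnts_cons, if_neg h, List.nil_append, ih]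

-- every entry text is non-empty and rstripped
theorem pvEnts_P (lines : List (List Char)) :
    ∀ e ∈ pvEnts lines, e.2 ≠ [] ∧ PySem.Chars.rstrip e.2 = e.2 := by
  intro e he
  simp only [pvEnts, List.mem_filterMap] at he
  obtain ⟨l, _, hl⟩ := he
  split_ifs at hl with hk
  · obtain ⟨h1, _⟩ := pv_keep_parts l hk
    cases hl
    exact ⟨h1, pv_rstrip_idem l⟩

-- ---------- A's entry loop vs takeWhile/dropWhile grouping ----------

theorem pv_procE_cont (b : Int) (ents : List (Int × List Char))
    (tactics cur : List (List Char)) (hcur : cur ≠ []) :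
    pvProcE b ents (tactics, cur) =
      (match ents.dropWhile (fun x => b < x.1) with
       | [] => (tactics, cur ++ (ents.takeWhile (fun x => b < x.1)).map (·.2))
       | e :: rest =>
         if e.1 ≤ b ∧ pvFirstWord (PySem.Chars.lstrip e.2) ∈ pvDecl then
           (tactics, cur ++ (ents.takeWhile (fun x => b < x.1)).map (·.2))
         else pvProcE b rest (tactics ++
           [PySem.Chars.join ['\n'] (cur ++ (ents.takeWhile (fun x => b < x.1)).map (·.2))],
           [e.2])) := by
  induction ents generalizing cur with
  | nil => simp [pvProcE]
  | cons e es ih =>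
    by_cases hb : b < e.1
    · have hne : ¬ e.1 ≤ b := by omega
      rw [List.dropWhile_cons, if_pos (by simpa using hb), List.takeWhile_cons,
        if_pos (by simpa using hb)]
      have hstep : pvProcE b (e :: es) (tactics, cur) = pvProcE b es (tactics, cur ++ [e.2]) := by
        simp only [pvProcE]
        rw [if_neg (by tauto), if_neg (by tauto)]
      rw [hstep, ih (cur ++ [e.2]) (by simp)]
      rcases hdw : es.dropWhile (fun x => b < x.1) with _ | ⟨e', rest'⟩ <;>
        simp [List.append_assoc]
    · have hle : e.1 ≤ b := by omega
      rw [List.dropWhile_cons, if_neg (by simpa using hb), List.takeWhile_cons,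
        if_neg (by simpa using hb)]
      simp only [pvProcE, List.map_nil, List.append_nil]
      split_ifs with h1 h2
      · rfl
      · rfl
      · exact absurd ⟨hle, hcur⟩ h2

-- drop past the takeWhile prefix is dropWhile (not found in the library)
theorem pv_drop_len_takeWhile {α : Type} (p : α → Bool) (l : List α) :
    l.drop (l.takeWhile p).length = l.dropWhile p := by
  induction l with
  | nil => rfl
  | cons a t ih =>
    by_cases h : p a = true
    · rw [List.takeWhile_cons, if_pos h, List.dropWhile_cons, if_pos h]
      simpa using ih
    · have h' : p a = false := by revert h; cases p a <;> simp
      rw [List.takeWhile_cons, if_neg (by simp [h']), List.dropWhile_cons, if_neg (by simp [h'])]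
      rfl

-- pvPost0 is additive
theorem pvPost0_append (t1 t2 : List (List Char)) :
    pvPost0 (t1 ++ t2) = pvPost0 t1 ++ pvPost0 t2 := by
  simp [pvPost0]

-- main correspondence: A's loop + epilogue computes B's groups
theorem pv_main (b : Int) : ∀ (n : Nat) (ents : List (Int × List Char)), ents.length ≤ n →
    (∀ e ∈ ents, e.2 ≠ [] ∧ PySem.Chars.rstrip e.2 = e.2) →
    ∀ (tactics : List (List Char)) (x : List Char), x ≠ [] → PySem.Chars.rstrip x = x →
    pvPost (pvProcE b ents (tactics, [x])) =
      pvPost0 tactics ++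
        PySem.Chars.join ['\n'] (PySem.Chars.lstrip x ::
            (ents.takeWhile (fun e => b < e.1)).map (·.2)) ::
          pvGroups b (ents.dropWhile (fun e => b < e.1)) := by
  intro n
  induction n with
  | zero =>
    intro ents hlen hP tactics x hx hrx
    have hnil : ents = [] := by cases ents with
      | nil => rfl
      | cons a l => simp at hlen
    subst hnil
    obtain ⟨hl, hrl⟩ := pv_lstrip_rstripped x hx hrx
    have hsx : PySem.Chars.strip x = PySem.Chars.lstrip x := by
      show PySem.Chars.rstrip (PySem.Chars.lstrip x) = _
      exact hrl
    simp only [pvProcE, List.takeWhile_nil, List.dropWhile_nil, List.map_nil, pvGroups]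
    unfold pvPost
    rw [if_pos (by simp)]
    rw [pvPost0_append, PySem.Chars.join_singleton, PySem.Chars.join_singleton]
    simp [pvPost0, hsx, hl]
  | succ n ih =>
    intro ents hlen hP tactics x hx hrx
    have hPcont : ∀ z ∈ x :: (ents.takeWhile (fun e => b < e.1)).map (·.2),
        z ≠ [] ∧ PySem.Chars.rstrip z = z := by
      intro z hz
      rcases List.mem_cons.1 hz with hz1 | hz1
      · subst hz1; exact ⟨hx, hrx⟩
      · obtain ⟨y, hy, hyz⟩ := List.mem_map.1 hz1
        subst hyz
        exact hP y ((List.takeWhile_prefix _).subset hy)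
    obtain ⟨hsj, hsjne⟩ := pv_strip_join x _ hPcont
    have hflush : pvPost (tactics, [x] ++ (ents.takeWhile (fun e => b < e.1)).map (·.2)) =
        pvPost0 tactics ++
          [PySem.Chars.join ['\n'] (PySem.Chars.lstrip x ::
            (ents.takeWhile (fun e => b < e.1)).map (·.2))] := by
      unfold pvPost
      rw [if_pos (by simp)]
      rw [List.singleton_append, pvPost0_append]
      simp [pvPost0, hsj, hsjne]
    rw [pv_procE_cont b ents tactics [x] (by simp)]
    rcases hdw : ents.dropWhile (fun e => b < e.1) with _ | ⟨e, rest⟩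
    · rw [hdw]
      simp only []
      rw [hflush]
      simp [pvGroups]
    · rw [hdw]
      simp only []
      have hdeclb : ((PySem.Chars.split₀ e.2).headD [] ∈ pvDeclAlt) =
          (pvFirstWord (PySem.Chars.lstrip e.2) ∈ pvDecl) := by
        rw [pv_firstWord_lstrip, pvDeclAlt_eq]
      by_cases hdecl : e.1 ≤ b ∧ pvFirstWord (PySem.Chars.lstrip e.2) ∈ pvDecl
      · rw [if_pos hdecl, hflush]
        rw [pvGroups]
        rw [if_pos (by rw [hdeclb]; exact hdecl)]
      · rw [if_neg hdecl, List.singleton_append]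
        obtain ⟨t, ht⟩ := List.dropWhile_suffix (l := ents) (p := fun e => b < e.1)
        rw [hdw] at ht
        have herest : ∀ z ∈ e :: rest, z ∈ ents := by
          intro z hz; rw [← ht]; exact List.mem_append_right _ hz
        have hlenr : rest.length ≤ n := by
          have := congrArg List.length ht
          simp at this; omega
        obtain ⟨he2, hre2⟩ := hP e (herest e List.mem_cons_self)
        rw [ih rest hlenr
          (fun z hz => hP z (herest z (List.mem_cons_of_mem _ hz)))
          (tactics ++ [PySem.Chars.join ['\n'] (x ::
            (ents.takeWhile (fun e => b < e.1)).map (·.2))]) e.2 he2 hre2]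
        rw [pvPost0_append]
        rw [pvGroups]
        rw [if_neg (by rw [hdeclb]; exact hdecl)]
        simp [pvPost0, hsj, hsjne]

-- ---------- B side: index loop → takeWhile/dropWhile grouping ----------

theorem pv_scan_eq (b : Int) (entries : List (Int × List Char)) : ∀ (n i : Nat),
    entries.length - i ≤ n → i ≤ entries.length →
    pvScan b entries i = i + ((entries.drop i).takeWhile (fun e => b < e.1)).length := by
  intro n
  induction n with
  | zero =>
    intro i h1 h2
    have hi : i = entries.length := by omega
    subst hi
    rw [pvScan]
    simp
  | succ n ih =>
    intro i h1 h2
    by_cases hlt : i < entries.length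
    · rw [List.drop_eq_getElem_cons hlt, pvScan]
      by_cases hb : b < entries[i].1
      · rw [dif_pos ⟨hlt, by rwa [List.getD_eq_getElem entries _ hlt]⟩,
          List.takeWhile_cons, if_pos (by simpa using hb)]
        rw [ih (i + 1) (by omega) (by omega)]
        simp; omega
      · rw [dif_neg (by rw [List.getD_eq_getElem entries _ hlt]; tauto),
          List.takeWhile_cons, if_neg (by simpa using hb)]
        simp
    · have hi : i = entries.length := by omega
      subst hi
      rw [pvScan]
      simp
  
theorem pv_build_eq (b : Int) (entries : List (Int × List Char)) : ∀ (n i : Nat)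
    (out : List (List Char)), entries.length - i ≤ n → i ≤ entries.length →
    pvBuild b entries i out = out ++ pvGroups b (entries.drop i) := by
  intro n
  induction n with
  | zero =>
    intro i out h1 h2
    have hi : i = entries.length := by omega
    subst hi
    rw [pvBuild, dif_neg (by omega)]
    simp [pvGroups]
  | succ n ih =>
    intro i out h1 h2
    by_cases hlt : i < entries.length
    · rw [pvBuild, dif_pos hlt]
      simp only [List.getD_eq_getElem entries _ hlt]
      rw [List.drop_eq_getElem_cons hlt]
      by_cases hdecl : entries[i].1 ≤ b ∧
          (PySem.Chars.split₀ entries[i].2).headD [] ∈ pvDeclAlt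
      · rw [if_pos hdecl, pvGroups, if_pos hdecl]
        simp
      · rw [if_neg hdecl]
        have hscan := pv_scan_eq b entries entries.length (i + 1) (by omega) (by omega)
        have hLle : ((entries.drop (i + 1)).takeWhile (fun e => b < e.1)).length ≤
            (entries.drop (i + 1)).length :=
          (List.takeWhile_prefix _).length_le
        have htake : (entries.drop (i + 1)).take (pvScan b entries (i + 1) - (i + 1)) =
            (entries.drop (i + 1)).takeWhile (fun e => b < e.1) := by
          rw [hscan, Nat.add_sub_cancel_left]
          exact (List.prefix_iff_eq_take.1 (List.takeWhile_prefix _)).symm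
        have hdropj : entries.drop (pvScan b entries (i + 1)) =
            (entries.drop (i + 1)).dropWhile (fun e => b < e.1) := by
          rw [hscan, ← List.drop_drop, pv_drop_len_takeWhile]
        rw [ih (pvScan b entries (i + 1)) _
          (by have := pvScan_ge b entries (i + 1); omega)
          (by rw [hscan]; simp at hLle ⊢; omega)]
        rw [htake, hdropj, pvGroups, if_neg hdecl]
        simp
    · have hi : i = entries.length := by omega
      subst hi
      rw [pvBuild, dif_neg (by omega)]
      simp [pvGroups]

-- ===== VERDICT (by name: the statement is the Claim_ definition above) =====
theorem extract_tactic_lines_spec : Claim_equal_extract_tactic_lines := by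
  intro tb _
  show extract_tactic_lines tb = extract_tactic_lines_alt tb
  have hmap : extract_tactic_lines tb =
      (pvPost (pvLoopA (PySem.Chars.splitOn tb.toList ['\n']) ([], []) none)).map
        String.ofList := by
    unfold extract_tactic_lines pvPost pvPost0
    simp [List.map_map, Function.comp]
  have hBE : pvEntriesB tb = pvEnts (PySem.Chars.splitOn tb.toList ['\n']) := rfl
  rw [hmap, pv_loopA_none]
  rcases hE : pvEnts (PySem.Chars.splitOn tb.toList ['\n']) with _ | ⟨e, rest⟩
  · simp only []
    have halt : extract_tactic_lines_alt tb = [] := by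
      unfold extract_tactic_lines_alt
      rw [hBE, hE]
    rw [halt]
    rfl
  · simp only []
    have halt : extract_tactic_lines_alt tb =
        (pvBuild e.1 (e :: rest) 0 []).map String.ofList := by
      unfold extract_tactic_lines_alt
      rw [hBE, hE]
    rw [halt, pv_build_eq e.1 (e :: rest) (e :: rest).length 0 [] (by omega) (by omega),
      List.drop_zero, List.nil_append]
    have hP := pvEnts_P (PySem.Chars.splitOn tb.toList ['\n'])
    rw [hE] at hP
    by_cases hdecl : pvFirstWord (PySem.Chars.lstrip e.2) ∈ pvDecl
    · have hA : pvProcE e.1 (e :: rest) ([], []) = ([], []) := by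
        simp only [pvProcE]
        rw [if_pos ⟨le_refl _, hdecl⟩]
      rw [hA, pvGroups, if_pos ⟨le_refl _, by rw [pv_firstWord_lstrip] at hdecl; rw [pvDeclAlt_eq]; exact hdecl⟩]
      rfl
    · have hA : pvProcE e.1 (e :: rest) ([], []) = pvProcE e.1 rest ([], [e.2]) := by
        simp only [pvProcE]
        rw [if_neg (by tauto), if_neg (by simp), List.nil_append]
      obtain ⟨he2, hre2⟩ := hP e List.mem_cons_self
      rw [hA, pv_main e.1 rest.length rest (le_refl _)
        (fun z hz => hP z (List.mem_cons_of_mem _ hz)) [] e.2 he2 hre2]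
      rw [pvGroups, if_neg (by rw [pv_firstWord_lstrip] at hdecl; rw [pvDeclAlt_eq]; tauto)]
      simp [pvPost0]
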